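-- pv_equiv track=rewrite | github.com/fpom/badass | badass/db/cli.py | _search
-- ===== SOURCE A (Python) =====
-- def _search (s, among) :
--     if s in among :
--         return s
--     candidates = [a for a in among if a.startswith(s)]
--     if not candidates :
--         raise ValueError(f"not match for '{s}'")
--     elif len(candidates) > 1 :
--         raise ValueError(f"more than one match for '{s}'")
--     return candidates[0]
-- ===== SOURCE B (Python) =====
-- def _search(s, among):
--     srt = sorted(among)
--     n = len(srt)
--     lo, hi = 0, n
--     while lo < hi:                      # binary search: leftmost index with srt[lo] >= s
--         mid = (lo + hi) // 2
--         if srt[mid] < s: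
--             lo = mid + 1
--         else:
--             hi = mid
--     if lo < n and srt[lo] == s:
--         return s
--     j = lo                              # prefix matches form a contiguous run starting at lo
--     while j < n and srt[j].startswith(s):
--         j += 1
--     if j == lo:
--         raise ValueError(f"not match for '{s}'")
--     if j - lo > 1:
--         raise ValueError(f"more than one match for '{s}'")
--     return srt[lo]
-- ===== Notes on version B (the rewrite author's own statement) =====
-- stated objective: alternative
-- what changed: B sorts the collection so prefix matches form one contiguous block, binary-searches for the leftmost element >= s (detecting an exact match there), and measures the run of prefix matches starting at that point, instead of A's membership test plus filter comprehension plus length checks.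
import Mathlib
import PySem

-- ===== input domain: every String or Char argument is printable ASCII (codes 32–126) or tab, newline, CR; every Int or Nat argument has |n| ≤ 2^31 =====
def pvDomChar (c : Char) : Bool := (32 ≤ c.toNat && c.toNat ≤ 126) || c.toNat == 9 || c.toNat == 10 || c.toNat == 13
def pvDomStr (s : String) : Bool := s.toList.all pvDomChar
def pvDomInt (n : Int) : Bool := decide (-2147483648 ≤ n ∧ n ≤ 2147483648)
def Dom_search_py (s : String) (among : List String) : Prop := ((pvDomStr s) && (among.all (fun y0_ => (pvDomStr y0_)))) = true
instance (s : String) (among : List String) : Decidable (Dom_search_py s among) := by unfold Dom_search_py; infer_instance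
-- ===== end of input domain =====

-- B re-solves the task by sorting: prefix matches are a contiguous block of the sorted list, found
-- by binary search for the leftmost element >= s; A filters the unsorted list (alternative algorithm).


-- ===== PORT A =====
def search_py (s : String) (among : List String) : String :=
  if s ∈ among then s
  else
    let candidates := among.filter (fun a => PySem.Str.startswith a s)
    if candidates = [] then ""            -- Python: raise ValueError (excluded by Pre_)
    else if candidates.length > 1 then "" -- Python: raise ValueError (excluded by Pre_)
    else candidates.head?.getD ""         -- candidates[0]

-- ===== PORT B =====
-- while lo < hi: mid = (lo+hi)//2; if srt[mid] < s: lo = mid+1 else: hi = mid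
-- (mid is always in range since hi ≤ len srt on every call from search_py_alt, so getD is exact)
def pvBisect (srt : List String) (s : String) (lo hi : Nat) : Nat :=
  if _h : lo < hi then
    let mid := (lo + hi) / 2
    if srt.getD mid "" < s then pvBisect srt s (mid + 1) hi
    else pvBisect srt s lo mid
  else lo
termination_by hi - lo
decreasing_by all_goals omega

-- while j < n and srt[j].startswith(s): j += 1
def pvRun (srt : List String) (s : String) (j : Nat) : Nat :=
  if _h : j < srt.length ∧ PySem.Str.startswith (srt.getD j "") s = true then pvRun srt s (j + 1)
  else j
termination_by srt.length - j
decreasing_by omega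

-- body of B after `srt = sorted(among)`: binary search, exact-match test, run measurement
def pvCore (s : String) (srt : List String) : String :=
  let n := srt.length
  let lo := pvBisect srt s 0 n
  if lo < n ∧ srt.getD lo "" = s then s
  else
    let j := pvRun srt s lo
    if j = lo then ""                     -- Python: raise ValueError (excluded by Pre_)
    else if j - lo > 1 then ""            -- Python: raise ValueError (excluded by Pre_)
    else srt.getD lo ""

def search_py_alt (s : String) (among : List String) : String :=
  pvCore s (PySem.List.sorted among (fun x => x) false)

-- ===== PRECONDITION & SPEC =====
-- Pre_ excludes exactly the inputs on which Python A raises ValueError: s absent from among and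
-- the number of prefix matches is not exactly one.
def Pre_search_py (s : String) (among : List String) : Prop :=
  s ∈ among ∨ (among.filter (fun a => PySem.Str.startswith a s)).length = 1
instance (s : String) (among : List String) : Decidable (Pre_search_py s among) := by
  unfold Pre_search_py; infer_instance

def pvWitness_search_py : String × List String := ("a", ["ab"])

def Spec_search_py (s : String) (among : List String) (out : String) : Prop := out = search_py_alt s among
instance (s : String) (among : List String) (out : String) : Decidable (Spec_search_py s among out) := by unfold Spec_search_py; infer_instance

-- ===== CLAIM (what is proved, stated in full; the proofs are below) =====
def Claim_equal_search_py : Prop := ∀ (s : String) (among : List String), Dom_search_py s among → Pre_search_py s among → Spec_search_py s among (search_py s among)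

-- ===== LEMMAS AND PROOFS =====
/-- A list-level order fact: no list is lexicographically below its own prefix. -/
theorem pv_not_lex_of_prefix (l x : List Char) (h : l <+: x) : ¬ List.Lex (· < ·) x l := by
  induction l generalizing x with
  | nil => intro hx; exact List.not_lex_nil hx
  | cons a l ih =>
    intro hx
    obtain ⟨t, rfl⟩ := h
    cases hx with
    | rel h' => exact lt_irrefl _ h'
    | cons h' => exact ih (l ++ t) ⟨t, rfl⟩ h'

/-- If `l ` is lexicographically below `w`, `w` does not extend `l` but `c` does, then `c` is
below `w`: lists extending `l` form an interval of the lexicographic order. -/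
theorem pv_lex_between (l w c : List Char) (hlw : List.Lex (· < ·) l w) (hw : ¬ l <+: w)
    (hc : l <+: c) : List.Lex (· < ·) c w := by
  revert hw
  induction hlw generalizing c with
  | nil => exact fun hw => absurd List.nil_prefix hw
  | @rel a l₁ b l₂ hab =>
    intro hw
    obtain ⟨t, rfl⟩ := hc
    exact List.Lex.rel hab
  | @cons a l₁ l₂ h ih =>
    intro hw
    obtain ⟨t, rfl⟩ := hc
    exact List.Lex.cons (ih (l₁ ++ t) ⟨t, rfl⟩
      (fun hp => hw (by obtain ⟨u, rfl⟩ := hp; exact ⟨u, rfl⟩)))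

/-- String form of `pv_not_lex_of_prefix`: a prefix match is `≥ s`. -/
theorem pv_str_not_lt (s x : String) (h : PySem.Str.startswith x s = true) : ¬ x < s := by
  rw [PySem.Str.startswith_eq, PySem.Chars.startswith_iff] at h
  rw [String.lt_iff_toList_lt]
  intro hlt
  exact pv_not_lex_of_prefix _ _ h hlt

/-- String form of `pv_lex_between`. -/
theorem pv_str_between (s w c : String) (hlw : ¬ w < s) (hw : ¬ PySem.Str.startswith w s = true)
    (hc : PySem.Str.startswith c s = true) : c < w := by
  rw [PySem.Str.startswith_eq, PySem.Chars.startswith_iff] at hw hc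
  rw [String.lt_iff_toList_lt]
  rcases lt_trichotomy s w with h | h | h
  · exact pv_lex_between s.toList w.toList c.toList (String.lt_iff_toList_lt.mp h) hw hc
  · subst h; exact absurd (List.prefix_refl _) hw
  · exact absurd h hlw

/-- Two positions satisfying `p` force `countP p ≥ 2`. -/
theorem pv_countP_two {α : Type} (p : α → Bool) (l : List α) (i j : Nat) (hij : i < j)
    (hj : j < l.length) (hpi : p (l[i]'(by omega)) = true) (hpj : p (l[j]'hj) = true) :
    2 ≤ l.countP p := by
  induction l generalizing i j with
  | nil => simp at hj
  | cons a t ih =>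
    rcases i with _ | i
    · simp only [List.getElem_cons_zero] at hpi
      rcases j with _ | j
      · omega
      · simp only [List.getElem_cons_succ] at hpj
        have h1 : 1 ≤ t.countP p := List.countP_pos_iff.mpr ⟨_, List.getElem_mem _, hpj⟩
        rw [List.countP_cons_of_pos (pa := hpi)]; omega
    · rcases j with _ | j
      · omega
      · simp only [List.getElem_cons_succ] at hpi hpj
        have := ih i j (by omega) (by simpa using hj) hpi hpj
        rw [List.countP_cons]; omega

/-- Monotone indexing of a `≤`-pairwise list, in `getD` form. -/
theorem pv_getD_mono (srt : List String) (hp : List.Pairwise (· ≤ ·) srt) (i j : Nat)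
    (hij : i ≤ j) (hj : j < srt.length) : srt.getD i "" ≤ srt.getD j "" := by
  rw [List.getD_eq_getElem srt _ (by omega), List.getD_eq_getElem srt _ hj]
  rcases Nat.lt_or_ge i j with h | h
  · exact List.pairwise_iff_getElem.mp hp i j (by omega) hj h
  · have : i = j := by omega
    subst this; exact le_refl _

/-- Binary-search invariant: `pvBisect` returns the boundary between the `< s` part and the rest. -/
theorem pvBisect_spec (srt : List String) (s : String) (hp : List.Pairwise (· ≤ ·) srt)
    (lo hi : Nat) (hlh : lo ≤ hi) (hhn : hi ≤ srt.length)
    (hlow : ∀ i, i < lo → srt.getD i "" < s)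
    (hhigh : ∀ i, hi ≤ i → i < srt.length → ¬ srt.getD i "" < s) :
    lo ≤ pvBisect srt s lo hi ∧ pvBisect srt s lo hi ≤ hi ∧
      (∀ i, i < pvBisect srt s lo hi → srt.getD i "" < s) ∧
      (∀ i, pvBisect srt s lo hi ≤ i → i < srt.length → ¬ srt.getD i "" < s) := by
  fun_induction pvBisect srt s lo hi with
  | case1 lo hi h mid hmid ih =>
    have step : ∀ i, i < mid + 1 → srt.getD i "" < s := by
      intro i hi2
      rcases Nat.lt_or_ge i lo with h2 | h2
      · exact hlow i h2
      · exact lt_of_le_of_lt (pv_getD_mono srt hp i mid (by omega) (by omega)) hmid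
    obtain ⟨a, b, c, d⟩ := ih (by omega) hhn step hhigh
    exact ⟨by omega, by omega, c, d⟩
  | case2 lo hi h mid hmid ih =>
    have step : ∀ i, mid ≤ i → i < srt.length → ¬ srt.getD i "" < s := by
      intro i h2 h3 hcon
      exact hmid (lt_of_le_of_lt (pv_getD_mono srt hp mid i h2 h3) hcon)
    obtain ⟨a, b, c, d⟩ := ih (by omega) (by omega) hlow step
    exact ⟨a, by omega, c, d⟩
  | case3 lo hi h => exact ⟨le_refl _, by omega, hlow, fun i h2 h3 => hhigh i (by omega) h3⟩

/-- If `s` occurs in the sorted list, the binary search lands on it and `pvCore` returns `s`. -/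
theorem pvCore_exact (s : String) (srt : List String) (hpair : List.Pairwise (· ≤ ·) srt)
    (hs : s ∈ srt) : pvCore s srt = s := by
  obtain ⟨-, hlon, B1, B2⟩ :=
    pvBisect_spec srt s hpair 0 srt.length (by omega) (le_refl _)
      (fun i h => absurd h (by omega)) (fun i h1 h2 => absurd h2 (by omega))
  simp only [pvCore]
  set lo := pvBisect srt s 0 srt.length with hlo
  obtain ⟨k, hk, hks⟩ := List.mem_iff_getElem.mp hs
  have klo : lo ≤ k := by
    by_contra hcon
    have := B1 k (by omega)
    rw [List.getD_eq_getElem srt _ hk, hks] at this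
    exact lt_irrefl _ this
  have hlo_n : lo < srt.length := lt_of_le_of_lt klo hk
  have hgetlo : srt.getD lo "" = s := by
    have h1 : srt.getD lo "" ≤ s := by
      have := pv_getD_mono srt hpair lo k klo hk
      rwa [List.getD_eq_getElem srt _ hk, hks] at this
    exact le_antisymm h1 (not_lt.mp (B2 lo (le_refl _) hlo_n))
  rw [if_pos ⟨hlo_n, hgetlo⟩]

/-- If `s` does not occur but exactly one element extends it, `pvCore` returns that element:
the run of prefix matches in the sorted list starts at the binary-search point and has length 1. -/
theorem pvCore_unique (s : String) (srt : List String) (c : String)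
    (hpair : List.Pairwise (· ≤ ·) srt) (hmem : s ∉ srt)
    (hsf : srt.filter (fun a => PySem.Str.startswith a s) = [c]) : pvCore s srt = c := by
  obtain ⟨-, hlon, B1, B2⟩ :=
    pvBisect_spec srt s hpair 0 srt.length (by omega) (le_refl _)
      (fun i h => absurd h (by omega)) (fun i h1 h2 => absurd h2 (by omega))
  simp only [pvCore]
  set p : String → Bool := fun a => PySem.Str.startswith a s with hpdef
  set lo := pvBisect srt s 0 srt.length with hlo
  have hcmem : c ∈ srt.filter p := by rw [hsf]; exact List.mem_singleton_self c
  have hcp : p c = true := (List.mem_filter.mp hcmem).2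
  have hcm : c ∈ srt := (List.mem_filter.mp hcmem).1
  obtain ⟨k, hk, hks⟩ := List.mem_iff_getElem.mp hcm
  have klo : lo ≤ k := by
    by_contra hcon
    have := B1 k (by omega)
    rw [List.getD_eq_getElem srt _ hk, hks] at this
    exact pv_str_not_lt s c hcp this
  have hlo_n : lo < srt.length := lt_of_le_of_lt klo hk
  have hplo : p (srt.getD lo "") = true := by
    by_contra hnp
    have hge : ¬ srt.getD lo "" < s := B2 lo (le_refl _) hlo_n
    have h1 : c < srt.getD lo "" := pv_str_between s (srt.getD lo "") c hge hnp hcp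
    have h2 : srt.getD lo "" ≤ c := by
      have := pv_getD_mono srt hpair lo k klo hk
      rwa [List.getD_eq_getElem srt _ hk, hks] at this
    exact lt_irrefl c (lt_of_lt_of_le h1 h2)
  have heqc : srt.getD lo "" = c := by
    have hmemf : srt.getD lo "" ∈ srt.filter p := by
      rw [List.getD_eq_getElem srt _ hlo_n]
      refine List.mem_filter.mpr ⟨List.getElem_mem _, ?_⟩
      rw [← List.getD_eq_getElem srt _ hlo_n]; exact hplo
    rw [hsf] at hmemf
    exact List.mem_singleton.mp hmemf
  have hguard : ¬ (lo < srt.length ∧ srt.getD lo "" = s) := by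
    rintro ⟨-, h2⟩
    rw [heqc] at h2
    exact hmem (h2 ▸ hcm)
  have hrun : pvRun srt s lo = lo + 1 := by
    rw [pvRun, dif_pos ⟨hlo_n, hplo⟩, pvRun, dif_neg]
    rintro ⟨h1, h2⟩
    have h2' : p (srt[lo + 1]'h1) = true := by
      rw [← List.getD_eq_getElem srt _ h1]; exact h2
    have hplo' : p (srt[lo]'hlo_n) = true := by
      rw [← List.getD_eq_getElem srt _ hlo_n]; exact hplo
    have h2le := pv_countP_two p srt lo (lo + 1) (by omega) h1 hplo' h2'
    rw [List.countP_eq_length_filter] at h2le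
    rw [hsf] at h2le
    simp at h2le
  rw [if_neg hguard, hrun, if_neg (by omega : ¬ lo + 1 = lo),
    if_neg (by omega : ¬ lo + 1 - lo > 1), heqc]

-- ===== VERDICT (by name: the statement is the Claim_ definition above) =====
theorem search_py_spec : Claim_equal_search_py := by
  intro s among _ hpre
  unfold Spec_search_py search_py search_py_alt
  have hperm : (PySem.List.sorted among (fun x => x) false).Perm among :=
    PySem.List.sorted_perm among (fun x => x) false
  have hpair : List.Pairwise (· ≤ ·) (PySem.List.sorted among (fun x => x) false) :=
    PySem.List.sorted_pairwise among (fun x => x)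
  by_cases hmem : s ∈ among
  · rw [if_pos hmem, pvCore_exact s _ hpair (hperm.mem_iff.mpr hmem)]
  · have hfil : (among.filter (fun a => PySem.Str.startswith a s)).length = 1 :=
      hpre.resolve_left hmem
    obtain ⟨c, hc⟩ := List.length_eq_one_iff.mp hfil
    have hsf : (PySem.List.sorted among (fun x => x) false).filter
        (fun a => PySem.Str.startswith a s) = [c] := by
      have h := hperm.filter (fun a => PySem.Str.startswith a s)
      rw [hc] at h
      exact List.perm_singleton.mp h
    rw [if_neg hmem,
      pvCore_unique s _ c hpair (fun hx => hmem (hperm.mem_iff.mp hx)) hsf]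
    simp only []
    rw [if_neg (by rw [hc]; simp : ¬ among.filter (fun a => PySem.Str.startswith a s) = []),
      if_neg (by rw [hfil]; omega : ¬ (among.filter (fun a => PySem.Str.startswith a s)).length > 1)]
    rw [hc]
    rfl
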